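-- pv_equiv track=rewrite | github.com/pypi-data/pypi-mirror-357 | packages/pgtui/pgtui-0.21.1.tar.gz/pgtui-0.21.1/src/pgtui/sql.py | _search_backward
-- ===== SOURCE A (Python) =====
-- def _search_backward(text: str, start: int):
--     for offset in range(start - 1, -1, -1):
--         if text[offset : offset + 2] == ";\n":
--             return offset + 2
--         if text[offset : offset + 1] == ";":
--             return offset + 1
--         if text[offset : offset + 2] == "\n\n":
--             return offset + 2
--     return 0
-- ===== SOURCE B (Python) =====
-- def _search_backward(text: str, start: int):
--     if start <= 0:
--         return 0
--     semi = text.rfind(';', 0, start)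
--     nn = text.rfind('\n\n', 0, start + 1)
--     if max(semi, nn) == -1:
--         return 0
--     if semi > nn:
--         return semi + 2 if text[semi:semi + 2] == ';\n' else semi + 1
--     return nn + 2
-- ===== Notes on version B (the rewrite author's own statement) =====
-- stated objective: idiomatic
-- what changed: Replaces A's explicit backward per-character Python loop with two str.rfind calls (rightmost ';' before start and rightmost '\n\n' before start+1) combined by a max/priority comparison.
import Mathlib
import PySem

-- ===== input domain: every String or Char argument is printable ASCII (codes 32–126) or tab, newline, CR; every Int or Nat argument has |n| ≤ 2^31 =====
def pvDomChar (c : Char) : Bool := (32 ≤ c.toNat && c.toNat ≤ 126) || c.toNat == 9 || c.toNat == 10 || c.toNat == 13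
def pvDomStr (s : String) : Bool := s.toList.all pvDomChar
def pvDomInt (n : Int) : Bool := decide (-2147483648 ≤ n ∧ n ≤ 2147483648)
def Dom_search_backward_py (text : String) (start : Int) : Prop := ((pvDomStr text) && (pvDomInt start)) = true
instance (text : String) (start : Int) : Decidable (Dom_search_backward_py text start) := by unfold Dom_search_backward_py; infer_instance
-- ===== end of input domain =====

-- B replaces A's backward character loop by two rfind calls (rightmost ';' / rightmost "\n\n") combined arithmetically (objective: idiomatic).

-- ===== PORT A =====
-- the for-loop over range(start-1,-1,-1): recursion counting n+1 → n, offset o = n;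
-- text[o:o+2] with o ≥ 0 is PySem.List.slice (exact: slice_natCast_add)
def searchA (cs : List Char) : Nat → Int
  | 0 => 0
  | n + 1 =>
    if PySem.List.slice cs (some (n : Int)) (some ((n : Int) + 2)) = [';', '\n'] then (n : Int) + 2
    else if PySem.List.slice cs (some (n : Int)) (some ((n : Int) + 1)) = [';'] then (n : Int) + 1
    else if PySem.List.slice cs (some (n : Int)) (some ((n : Int) + 2)) = ['\n', '\n'] then (n : Int) + 2
    else searchA cs n

def search_backward_py (text : String) (start : Int) : Int :=
  searchA text.toList start.toNat

-- ===== PORT B =====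
-- text.rfind(c, 0, e) for a 1-char needle, e ≥ 0: scan i = e-1, e-2, …; exact since
-- a position i ≥ len(text) never matches (cs[i]? = none) and rfind clamps its end.
def rfind1 (cs : List Char) (c : Char) : Nat → Int
  | 0 => -1
  | e + 1 => if cs[e]? = some c then (e : Int) else rfind1 cs c e

-- text.rfind(c₁c₂, 0, e): a match at i needs i+2 ≤ e and i+1 < len (cs[i+1]? = some _)
def rfind2 (cs : List Char) (c₁ c₂ : Char) : Nat → Int
  | 0 => -1
  | 1 => -1
  | e + 2 => if cs[e]? = some c₁ ∧ cs[e + 1]? = some c₂ then (e : Int) else rfind2 cs c₁ c₂ (e + 1)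

def altBody (cs : List Char) (m : Nat) : Int :=
  let semi := rfind1 cs ';' m
  let nn := rfind2 cs '\n' '\n' (m + 1)
  if max semi nn = -1 then 0
  else if semi > nn then
    (if PySem.List.slice cs (some semi) (some (semi + 2)) = [';', '\n'] then semi + 2 else semi + 1)
  else nn + 2

def search_backward_py_alt (text : String) (start : Int) : Int :=
  if start ≤ 0 then 0 else altBody text.toList start.toNat

-- ===== PRECONDITION & SPEC =====
def Spec_search_backward_py (text : String) (start : Int) (out : Int) : Prop := out = search_backward_py_alt text start
instance (text : String) (start : Int) (out : Int) : Decidable (Spec_search_backward_py text start out) := by unfold Spec_search_backward_py; infer_instance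

-- ===== CLAIM (what is proved, stated in full; the proofs are below) =====
def Claim_equal_search_backward_py : Prop := ∀ (text : String) (start : Int), Dom_search_backward_py text start → Spec_search_backward_py text start (search_backward_py text start)

-- ===== LEMMAS AND PROOFS =====

lemma rfind1_bounds (cs : List Char) (c : Char) (e : Nat) :
    -1 ≤ rfind1 cs c e ∧ rfind1 cs c e < (e : Int) := by
  induction e with
  | zero => simp [rfind1]
  | succ n ih =>
    simp only [rfind1]
    split_ifs <;> push_cast <;> omega

lemma rfind2_bounds (cs : List Char) (c₁ c₂ : Char) (e : Nat) :
    -1 ≤ rfind2 cs c₁ c₂ e ∧ (rfind2 cs c₁ c₂ e = -1 ∨ rfind2 cs c₁ c₂ e ≤ (e : Int) - 2) := by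
  induction e using Nat.strong_induction_on with
  | _ e ih =>
    match e with
    | 0 => simp [rfind2]
    | 1 => simp [rfind2]
    | n + 2 =>
      have h := ih (n + 1) (by omega)
      simp only [rfind2]
      split_ifs <;> push_cast at * <;> omega

lemma head?_tail_drop (cs : List Char) (n : Nat) :
    (cs.drop n).head? = cs[n]? ∧ (cs.drop n).tail = cs.drop (n + 1) := by
  constructor
  · exact (List.head?_drop : (cs.drop n).head? = cs[n]?)
  · exact (List.tail_drop : (cs.drop n).tail = cs.drop (n + 1))

lemma take_drop_char (cs : List Char) (n : Nat) :
    (cs.drop n).take 2 = (cs[n]?.toList ++ cs[n+1]?.toList).take 2 ∧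
    (cs.drop n).take 1 = cs[n]?.toList := by
  rcases h : cs.drop n with _ | ⟨c, rest⟩
  · have h0 : cs[n]? = none := by
      have := (head?_tail_drop cs n).1; rw [h] at this; simpa using this.symm
    have hl : cs.length ≤ n := by
      by_contra hb
      simp only [not_le] at hb
      have : cs.drop n ≠ [] := by simp [List.drop_eq_nil_iff]; omega
      exact this h
    have h1 : cs[n+1]? = none := List.getElem?_eq_none (by omega)
    simp [h0, h1]
  · have h0 : cs[n]? = some c := by
      have := (head?_tail_drop cs n).1; rw [h] at this; simpa using this.symm
    have h1 : cs[n+1]? = rest.head? := by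
      have ht := (head?_tail_drop cs n).2; rw [h] at ht; simp at ht
      rw [← (head?_tail_drop cs (n+1)).1, ← ht]
    rcases hr : rest with _ | ⟨d, rest'⟩ <;> simp_all

lemma slice2_eq (cs : List Char) (n : Nat) :
    PySem.List.slice cs (some (n : Int)) (some ((n : Int) + 2)) = (cs.drop n).take 2 := by
  simpa using PySem.List.slice_natCast_add cs n 2

lemma slice1_eq (cs : List Char) (n : Nat) :
    PySem.List.slice cs (some (n : Int)) (some ((n : Int) + 1)) = (cs.drop n).take 1 := by
  simpa using PySem.List.slice_natCast_add cs n 1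

-- when position n matches neither pattern, B's two rfinds step down together
lemma altBody_step (cs : List Char) (n : Nat)
    (h1 : rfind1 cs ';' (n + 1) = rfind1 cs ';' n)
    (h2 : rfind2 cs '\n' '\n' (n + 2) = rfind2 cs '\n' '\n' (n + 1)) :
    altBody cs (n + 1) = altBody cs n := by
  simp only [altBody, h1, h2]

-- the main induction: A's backward scan equals B's combination of the two rfinds
lemma main (cs : List Char) (n : Nat) : searchA cs n = altBody cs n := by
  induction n with
  | zero => simp [searchA, altBody, rfind1, rfind2]
  | succ n ih =>
    have hs2 := slice2_eq cs n
    have hs1 := slice1_eq cs n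
    have htd := take_drop_char cs n
    have hr1 : rfind1 cs ';' (n + 1) = if cs[n]? = some ';' then (n : Int) else rfind1 cs ';' n := rfl
    have hr2 : rfind2 cs '\n' '\n' (n + 2) =
        if cs[n]? = some '\n' ∧ cs[n+1]? = some '\n' then (n : Int)
        else rfind2 cs '\n' '\n' (n + 1) := rfl
    have hnorm : n + 1 + 1 = n + 2 := rfl
    have hb1 := rfind1_bounds cs ';' n
    have hb2 := rfind2_bounds cs '\n' '\n' (n + 1)
    rcases h0 : cs[n]? with _ | c
    · -- beyond the end: nothing matches at n; both sides step down
      have h1 : cs[n+1]? = none := by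
        have hl : cs.length ≤ n := by
          by_contra hb
          simp only [not_le] at hb
          simp [hb] at h0
        exact List.getElem?_eq_none (by omega)
      have e1 : rfind1 cs ';' (n+1) = rfind1 cs ';' n := by rw [hr1]; simp [h0]
      have e2 : rfind2 cs '\n' '\n' (n+2) = rfind2 cs '\n' '\n' (n+1) := by rw [hr2]; simp [h0]
      rw [searchA, hs1, hs2, htd.1, htd.2, h0, h1, altBody_step cs n e1 e2, ← ih]
      simp
    · by_cases hc : c = ';'
      · subst hc
        -- ';' at n: A returns here; B has semi = n > nn
        have e2 : rfind2 cs '\n' '\n' (n+2) = rfind2 cs '\n' '\n' (n+1) := by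
          rw [hr2]; rw [if_neg]; rintro ⟨ha, _⟩; rw [h0] at ha
          exact absurd (Option.some.inj ha) (by decide)
        have hsemi : rfind1 cs ';' (n+1) = (n : Int) := by rw [hr1, if_pos h0]
        have hmax : ¬ (max ((n : Int)) (rfind2 cs '\n' '\n' (n+1)) = -1) := by
          intro hM
          have hle := le_max_left ((n : Int)) (rfind2 cs '\n' '\n' (n+1))
          rw [hM] at hle; omega
        have hgt : ((n : Int)) > rfind2 cs '\n' '\n' (n+1) := by
          rcases hb2 with ⟨hA, hB⟩; push_cast at hB ⊢; omega
        have hB : altBody cs (n+1) =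
            (if PySem.List.slice cs (some (n : Int)) (some ((n:Int) + 2)) = [';', '\n']
             then (n : Int) + 2 else (n : Int) + 1) := by
          simp only [altBody, hnorm, hsemi, e2]
          rw [if_neg hmax, if_pos hgt]
        rw [searchA, hB, hs1, hs2, htd.1, htd.2, h0]
        rcases h1 : cs[n+1]? with _ | d
        · simp
        · by_cases hd : d = '\n'
          · subst hd; simp
          · simp [hd]
      · -- no ';' at n
        have e1 : rfind1 cs ';' (n+1) = rfind1 cs ';' n := by
          rw [hr1, if_neg]; intro ha; rw [h0] at ha; exact hc (Option.some.inj ha)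
        by_cases hnl : c = '\n' ∧ cs[n+1]? = some '\n'
        · obtain ⟨hc1, h1⟩ := hnl; subst hc1
          -- "\n\n" at n: A returns n + 2; B has nn = n ≥ semi
          have hnn : rfind2 cs '\n' '\n' (n+2) = (n : Int) := by
            rw [hr2, if_pos ⟨h0, h1⟩]
          have hmax : ¬ (max (rfind1 cs ';' n) ((n : Int)) = -1) := by
            intro hM
            have hle := le_max_right (rfind1 cs ';' n) ((n : Int))
            rw [hM] at hle; omega
          have hgt : ¬ (rfind1 cs ';' n > ((n : Int))) := by
            rcases hb1 with ⟨_, hB⟩; omega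
          have hB : altBody cs (n+1) = (n : Int) + 2 := by
            simp only [altBody, hnorm, hnn, e1]
            rw [if_neg hmax, if_neg hgt]
          rw [searchA, hB, hs1, hs2, htd.1, htd.2, h0, h1]
          simp
        · -- nothing matches at n: both sides step down
          have e2 : rfind2 cs '\n' '\n' (n+2) = rfind2 cs '\n' '\n' (n+1) := by
            rw [hr2, if_neg]; rintro ⟨ha, hb⟩; rw [h0] at ha
            exact hnl ⟨Option.some.inj ha, hb⟩
          rw [searchA, hs1, hs2, htd.1, htd.2, h0, ih, altBody_step cs n e1 e2]
          rcases hx : cs[n+1]? with _ | d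
          · simp [hc]
          · have hd : ¬ (c = '\n' ∧ d = '\n') := by
              rintro ⟨ha, hb⟩; exact hnl ⟨ha, by rw [hx, hb]⟩
            simp [hc, hd]

lemma main_top (text : String) (start : Int) :
    search_backward_py text start = search_backward_py_alt text start := by
  unfold search_backward_py search_backward_py_alt
  by_cases h : start ≤ 0
  · have h0 : start.toNat = 0 := by omega
    simp [h0, h, searchA]
  · simp only [if_neg h]
    exact main _ _

-- ===== VERDICT (by name: the statement is the Claim_ definition above) =====
theorem search_backward_py_spec : Claim_equal_search_backward_py := by
  intro text start _
  unfold Spec_search_backward_py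
  exact main_top text start
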